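-- pv_equiv track=rewrite | github.com/Abh004/RMA_PA_OOAD | voc_analyzer.py | build_phrases
-- ===== SOURCE A (Python) =====
-- STOPWORDS = {
--     "a",
--     "an",
--     "the",
--     "and",
--     "or",
--     "but",
--     "if",
--     "then",
--     "else",
--     "when",
--     "at",
--     "by",
--     "for",
--     "from",
--     "in",
--     "into",
--     "on",
--     "onto",
--     "of",
--     "off",
--     "over",
--     "under",
--     "to",
--     "with",
--     "without",
--     "as",
--     "is",
--     "are",
--     "was",
--     "were",
--     "be",
--     "been",
--     "being",
--     "it",
--     "this",
--     "that",
--     "these",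
--     "those",
--     "i",
--     "me",
--     "my",
--     "we",
--     "our",
--     "you",
--     "your",
--     "he",
--     "she",
--     "they",
--     "them",
--     "his",
--     "her",
--     "their",
--     "not",
--     "no",
--     "nor",
--     "so",
--     "too",
--     "very",
--     "just",
--     "also",
--     "can",
--     "could",
--     "should",
--     "would",
--     "will",
--     "have",
--     "has",
--     "had",
--     "do",
--     "does",
--     "did",
-- }
--
-- def build_phrases(tokens):
--     phrases = []
--     current = []
--     for t in tokens:
--         if t in STOPWORDS:
--             if current:
--                 phrases.append(current)
--                 current = []
--         else:
--             current.append(t)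
--     if current:
--         phrases.append(current)
--     return phrases
-- ===== SOURCE B (Python) =====
-- STOPWORDS = {
--     "a",
--     "an",
--     "the",
--     "and",
--     "or",
--     "but",
--     "if",
--     "then",
--     "else",
--     "when",
--     "at",
--     "by",
--     "for",
--     "from",
--     "in",
--     "into",
--     "on",
--     "onto",
--     "of",
--     "off",
--     "over",
--     "under",
--     "to",
--     "with",
--     "without",
--     "as",
--     "is",
--     "are",
--     "was",
--     "were",
--     "be",
--     "been",
--     "being",
--     "it",
--     "this",
--     "that",
--     "these",
--     "those",
--     "i",
--     "me",
--     "my",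
--     "we",
--     "our",
--     "you",
--     "your",
--     "he",
--     "she",
--     "they",
--     "them",
--     "his",
--     "her",
--     "their",
--     "not",
--     "no",
--     "nor",
--     "so",
--     "too",
--     "very",
--     "just",
--     "also",
--     "can",
--     "could",
--     "should",
--     "would",
--     "will",
--     "have",
--     "has",
--     "had",
--     "do",
--     "does",
--     "did",
-- }
--
-- def build_phrases(tokens):
--     # Two phases: first group consecutive tokens into maximal runs keyed by
--     # "is stopword", then keep just the non-stopword runs.
--     groups = []
--     for t in tokens:
--         k = t in STOPWORDS
--         if groups and groups[-1][0] == k: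
--             groups[-1][1].append(t)
--         else:
--             groups.append((k, [t]))
--     return [g for k, g in groups if not k]
-- ===== Notes on version B (the rewrite author's own statement) =====
-- stated objective: alternative
-- what changed: Replaced A's single pass with a current-phrase accumulator, conditional flush and trailing flush by a two-phase groupby-style algorithm: build the list of maximal runs of consecutive tokens keyed by stopword-ness, then filter out the stopword runs.
import Mathlib
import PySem

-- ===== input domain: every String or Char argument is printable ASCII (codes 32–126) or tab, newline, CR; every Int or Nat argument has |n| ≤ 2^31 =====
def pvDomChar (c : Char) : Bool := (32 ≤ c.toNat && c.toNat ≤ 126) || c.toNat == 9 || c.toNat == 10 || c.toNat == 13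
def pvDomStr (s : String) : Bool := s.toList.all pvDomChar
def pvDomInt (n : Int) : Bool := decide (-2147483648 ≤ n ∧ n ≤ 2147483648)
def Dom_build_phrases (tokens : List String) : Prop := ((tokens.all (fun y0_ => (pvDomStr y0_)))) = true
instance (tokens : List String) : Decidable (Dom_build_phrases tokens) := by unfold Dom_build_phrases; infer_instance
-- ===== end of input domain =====

-- ===== PORT A =====
-- B replaces A's one-pass accumulate-and-flush loop by a two-phase groupby-style
-- algorithm (build maximal same-key runs, then keep the non-stopword runs); alternative, not faster.
def STOPWORDS : PySem.Set String := PySem.Set.ofList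
  ["a", "an", "the", "and", "or", "but", "if", "then", "else", "when", "at", "by",
   "for", "from", "in", "into", "on", "onto", "of", "off", "over", "under", "to",
   "with", "without", "as", "is", "are", "was", "were", "be", "been", "being", "it",
   "this", "that", "these", "those", "i", "me", "my", "we", "our", "you", "your",
   "he", "she", "they", "them", "his", "her", "their", "not", "no", "nor", "so",
   "too", "very", "just", "also", "can", "could", "should", "would", "will", "have",
   "has", "had", "do", "does", "did"]

-- the body of A's 'for t in tokens' loop, over the state (phrases, current)
def bp_step (st : List (List String) × List String) (t : String) :
    List (List String) × List String :=
  if PySem.Set.contains STOPWORDS t then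
    if st.2 ≠ [] then (st.1 ++ [st.2], []) else st
  else
    (st.1, st.2 ++ [t])

def build_phrases (tokens : List String) : List (List String) :=
  let s := tokens.foldl bp_step ([], [])
  if s.2 ≠ [] then s.1 ++ [s.2] else s.1

-- ===== PORT B =====
-- the body of B's first-phase loop: attach token t to the run list 'groups'
-- (extend the last run if its key matches, else start a new run)
def bp_push (groups : List (Bool × List String)) (t : String) :
    List (Bool × List String) :=
  let k := PySem.Set.contains STOPWORDS t
  match groups.getLast? with
  | some (k', g) => if k' == k then groups.dropLast ++ [(k', g ++ [t])]
                    else groups ++ [(k, [t])]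
  | none => [(k, [t])]

def build_phrases_alt (tokens : List String) : List (List String) :=
  ((tokens.foldl bp_push []).filter (fun g => !g.1)).map (fun g => g.2)

-- ===== PRECONDITION & SPEC =====
def Spec_build_phrases (tokens : List String) (out : List (List String)) : Prop := out = build_phrases_alt tokens
instance (tokens : List String) (out : List (List String)) : Decidable (Spec_build_phrases tokens out) := by unfold Spec_build_phrases; infer_instance

-- ===== CLAIM (what is proved, stated in full; the proofs are below) =====
def Claim_equal_build_phrases : Prop := ∀ (tokens : List String), Dom_build_phrases tokens → Spec_build_phrases tokens (build_phrases tokens)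

-- ===== LEMMAS AND PROOFS =====

-- the non-stopword runs of a run list, B's second phase
def bp_out (gs : List (Bool × List String)) : List (List String) :=
  (gs.filter (fun g => !g.1)).map (fun g => g.2)

-- simulation relation between A's state (p, c) and B's run list gs
def bpR (p : List (List String)) (c : List String)
    (gs : List (Bool × List String)) : Prop :=
  bp_out gs = p ++ (if c = [] then [] else [c]) ∧
  (match gs.getLast? with
   | some (false, g) => c = g ∧ g ≠ []
   | _ => c = [])

lemma bp_out_append (xs ys : List (Bool × List String)) :
    bp_out (xs ++ ys) = bp_out xs ++ bp_out ys := by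
  simp [bp_out, List.filter_append]

lemma bpR_step (p : List (List String)) (c : List String)
    (gs : List (Bool × List String)) (t : String) (h : bpR p c gs) :
    bpR (bp_step (p, c) t).1 (bp_step (p, c) t).2 (bp_push gs t) := by
  obtain ⟨h1, h2⟩ := h
  rcases List.eq_nil_or_concat gs with rfl | ⟨ys, ⟨k', g⟩, rfl⟩
  · -- gs = [], so c = [] and p = []
    simp only [List.getLast?_nil] at h2
    subst h2
    have hp : p = [] := by simpa [bp_out] using h1.symm
    subst hp
    by_cases hk : t ∈ STOPWORDS <;>
      simp [bpR, bp_step, bp_push, bp_out, List.filter, hk]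
  · simp only [List.concat_eq_append] at h1 h2 ⊢
    simp only [List.getLast?_concat] at h2
    by_cases hk : t ∈ STOPWORDS <;> cases k'
    · -- stopword token, last run non-stop: flush; new stopword run
      obtain ⟨rfl, hg⟩ := h2
      simp only [bp_out_append, if_neg hg] at h1
      have hb : bp_out [((false : Bool), c)] = [c] := by simp [bp_out, List.filter]
      rw [hb] at h1
      have hp : bp_out ys = p := (List.append_inj' h1 rfl).1
      simp only [bp_out] at hp
      simp [bpR, bp_step, bp_push, hk, bp_out, List.filter, hg, hp]
    · -- stopword token, last run is a stopword run: extend it; c stays []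
      subst h2
      simp only [bp_out_append] at h1
      have hb : bp_out [((true : Bool), g)] = [] := by simp [bp_out, List.filter]
      rw [hb, List.append_nil] at h1
      simp only [bp_out] at h1
      simp [bpR, bp_step, bp_push, hk, bp_out, List.filter, h1]
    · -- non-stopword token, last run non-stop: extend it; c = g ≠ []
      obtain ⟨rfl, hg⟩ := h2
      simp only [bp_out_append, if_neg hg] at h1
      have hb : bp_out [((false : Bool), c)] = [c] := by simp [bp_out, List.filter]
      rw [hb] at h1
      have hp : bp_out ys = p := (List.append_inj' h1 rfl).1
      simp only [bp_out] at hp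
      simp [bpR, bp_step, bp_push, hk, bp_out, List.filter, hp, hg]
    · -- non-stopword token, last run is a stopword run: start a new run; c = []
      subst h2
      simp only [bp_out_append] at h1
      have hb : bp_out [((true : Bool), g)] = [] := by simp [bp_out, List.filter]
      rw [hb, List.append_nil] at h1
      simp only [bp_out] at h1
      simp [bpR, bp_step, bp_push, hk, bp_out, List.filter, h1]

set_option maxRecDepth 8192 in
lemma bp_sim (ts : List String) :
    ∀ (p : List (List String)) (c : List String) (gs : List (Bool × List String)),
    bpR p c gs →
    (let s := ts.foldl bp_step (p, c)
     if s.2 ≠ [] then s.1 ++ [s.2] else s.1) = bp_out (ts.foldl bp_push gs) := by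
  induction ts with
  | nil =>
    intro p c gs ⟨h1, _⟩
    by_cases hc : c = [] <;> simp [hc, h1]
  | cons t ts ih =>
    intro p c gs h
    rw [List.foldl_cons, List.foldl_cons]
    exact ih _ _ _ (bpR_step p c gs t h)

-- ===== VERDICT (by name: the statement is the Claim_ definition above) =====
theorem build_phrases_spec : Claim_equal_build_phrases := by
  intro tokens _
  unfold Spec_build_phrases build_phrases build_phrases_alt
  have := bp_sim tokens [] [] [] (by simp [bpR, bp_out])
  simpa [bp_out] using this
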